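-- pv_equiv track=rewrite | github.com/mortyc126-debug/SHA | T4_proof.py | carry_jacobian_at_zero
-- ===== SOURCE A (Python) =====
-- def carry_jacobian_at_zero(y, n):
--     """Compute Jacobian of C_y at x=0 analytically."""
--     J = [[0]*n for _ in range(n)]
--     for k in range(1, n):
--         for j in range(k):
--             # J[k][j] = product of y[i] for i = j to k-1
--             prod = 1
--             for i in range(j, k):
--                 prod &= (y >> i) & 1
--             J[k][j] = prod
--     return J
-- ===== SOURCE B (Python) =====
-- def carry_jacobian_at_zero(y, n):
--     """Compute Jacobian of C_y at x=0 analytically.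
--
--     One pass: keep last0, the largest bit position < k where y has a 0 bit
--     (or -1); row k then has ones exactly at j in [last0+1, k).
--     """
--     J = []
--     last0 = -1
--     for k in range(n):
--         if k > 0 and ((y >> (k - 1)) & 1) == 0:
--             last0 = k - 1
--         row = [0] * n
--         for j in range(last0 + 1, k):
--             row[j] = 1
--         J.append(row)
--     return J
-- ===== Notes on version B (the rewrite author's own statement) =====
-- stated objective: faster
-- what changed: B replaces A's cubic triple loop (recomputing the range-AND of bits j..k-1 for every cell) by a single scan over k that tracks last0, the most recent zero-bit position of y below k, so each row's ones segment [last0+1, k) is written directly.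
import Mathlib
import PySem

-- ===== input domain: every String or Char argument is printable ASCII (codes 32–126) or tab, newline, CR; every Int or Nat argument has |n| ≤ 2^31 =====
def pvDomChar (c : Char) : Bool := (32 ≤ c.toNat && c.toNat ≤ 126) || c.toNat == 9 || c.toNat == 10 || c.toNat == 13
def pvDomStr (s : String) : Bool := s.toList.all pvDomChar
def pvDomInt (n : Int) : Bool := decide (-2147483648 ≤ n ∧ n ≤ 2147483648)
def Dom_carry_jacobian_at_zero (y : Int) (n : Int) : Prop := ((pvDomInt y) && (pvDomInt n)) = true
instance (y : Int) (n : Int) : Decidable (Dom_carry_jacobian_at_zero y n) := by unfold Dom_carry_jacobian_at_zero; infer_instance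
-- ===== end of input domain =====

-- B replaces A's cubic triple loop by a single scan that tracks last0, the most recent
-- zero-bit position of y below k, so each row is written directly (objective: faster, asymptotic).

-- ===== PORT A =====
-- literal transliteration of A; all indices k, j are in range by construction, so the
-- total pySetD/pyGetD forms are exact here.
def carry_jacobian_at_zero (y : Int) (n : Int) : List (List Int) :=
  let J0 := (PySem.List.pyRange 0 n 1).map (fun _ => List.replicate n.toNat (0 : Int))
  (PySem.List.pyRange 1 n 1).foldl (fun J k =>
    (PySem.List.pyRange 0 k 1).foldl (fun J j =>
      let prod := (PySem.List.pyRange j k 1).foldl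
        (fun p i => PySem.Int.band p (PySem.Int.band (y >>> i.toNat) 1)) 1
      PySem.List.pySetD J k (PySem.List.pySetD (PySem.List.pyGetD J k []) j prod)) J) J0

-- ===== PORT B =====
-- transliteration of Source B: one fold over k carrying (rows so far, last0).
def carry_jacobian_at_zero_alt (y : Int) (n : Int) : List (List Int) :=
  ((PySem.List.pyRange 0 n 1).foldl (fun (st : List (List Int) × Int) k =>
    let last0 := if 0 < k ∧ PySem.Int.band (y >>> (k - 1).toNat) 1 = 0 then k - 1 else st.2
    let row := (PySem.List.pyRange (last0 + 1) k 1).foldl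
      (fun r j => PySem.List.pySetD r j 1) (List.replicate n.toNat (0 : Int))
    (st.1 ++ [row], last0)) ([], -1)).1

-- ===== PRECONDITION & SPEC =====
def Spec_carry_jacobian_at_zero (y : Int) (n : Int) (out : List (List Int)) : Prop := out = carry_jacobian_at_zero_alt y n
instance (y : Int) (n : Int) (out : List (List Int)) : Decidable (Spec_carry_jacobian_at_zero y n out) := by unfold Spec_carry_jacobian_at_zero; infer_instance

-- ===== CLAIM (what is proved, stated in full; the proofs are below) =====
def Claim_equal_carry_jacobian_at_zero : Prop := ∀ (y : Int) (n : Int), Dom_carry_jacobian_at_zero y n → Spec_carry_jacobian_at_zero y n (carry_jacobian_at_zero y n)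

-- ===== LEMMAS AND PROOFS =====

def pvBit (y : Int) (i : Nat) : Int := PySem.Int.band (y >>> i) 1

theorem pvBit_cases (y : Int) (i : Nat) : pvBit y i = 0 ∨ pvBit y i = 1 := by
  unfold pvBit
  rw [PySem.Int.band_one]
  have h1 := PySem.Int.mod_nonneg (y >>> i) (b := 2) (by omega)
  have h2 := PySem.Int.mod_lt (y >>> i) (b := 2) (by omega)
  omega

def pvLz (y : Int) : Nat → Int
  | 0 => -1
  | k + 1 => if pvBit y k = 0 then (k : Int) else pvLz y k

theorem pvLz_bounds (y : Int) (k : Nat) : -1 ≤ pvLz y k ∧ pvLz y k < (k : Int) := by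
  induction k with
  | zero => simp [pvLz]
  | succ k ih => unfold pvLz; split <;> push_cast <;> omega

theorem foldl_band_zero (f : Int → Int) (l : List Int) :
    l.foldl (fun p i => PySem.Int.band p (f i)) 0 = 0 := by
  induction l with
  | nil => rfl
  | cons a l ih =>
      simp only [List.foldl_cons]
      rw [PySem.Int.band_comm, PySem.Int.band_zero]
      exact ih

theorem foldl_band_one (f : Int → Int) (hf : ∀ x, f x = 0 ∨ f x = 1) (l : List Int) :
    l.foldl (fun p i => PySem.Int.band p (f i)) 1 = if ∀ i ∈ l, f i = 1 then 1 else 0 := by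
  induction l with
  | nil => simp
  | cons a l ih =>
      simp only [List.foldl_cons]
      rcases hf a with h | h
      · rw [h]
        have : PySem.Int.band 1 0 = 0 := by decide
        rw [this, foldl_band_zero]
        have hna : ¬ (∀ i ∈ a :: l, f i = 1) := by
          intro hall; have := hall a (by simp); omega
        rw [if_neg hna]
      · rw [h]
        have : PySem.Int.band 1 1 = 1 := by decide
        rw [this, ih]
        by_cases hall : ∀ i ∈ l, f i = 1
        · rw [if_pos hall, if_pos (by intro i hi; rcases List.mem_cons.1 hi with rfl | hi; exacts [h, hall i hi])]
        · rw [if_neg hall, if_neg (by intro hc; exact hall (fun i hi => hc i (by simp [hi])))]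

theorem allOnes_iff (y : Int) (k : Nat) (j : Int) (h0 : 0 ≤ j) :
    ((∀ i ∈ PySem.List.pyRange j (k : Int) 1, PySem.Int.band (y >>> ((i.toNat : Nat) : Int)) 1 = 1) ↔ pvLz y k < j) := by
  induction k with
  | zero =>
      constructor
      · intro _; have := (pvLz_bounds y 0).2; omega
      · intro _ i hi
        rw [PySem.List.mem_pyRange_one] at hi; omega
  | succ k ih =>
      by_cases hjk : (k : Int) < j
      · constructor
        · intro _; have := (pvLz_bounds y (k+1)).2; omega
        · intro _ i hi
          rw [PySem.List.mem_pyRange_one] at hi; omega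
      · rw [not_lt] at hjk
        push_cast
        rw [PySem.List.pyRange_one_succ_right (by omega)]
        have hsplit : (∀ i ∈ PySem.List.pyRange j (k:Int) 1 ++ [(k:Int)], PySem.Int.band (y >>> ((i.toNat : Nat) : Int)) 1 = 1)
            ↔ ((∀ i ∈ PySem.List.pyRange j (k:Int) 1, PySem.Int.band (y >>> ((i.toNat : Nat) : Int)) 1 = 1) ∧ PySem.Int.band (y >>> (((k:Int).toNat : Nat) : Int)) 1 = 1) := by
          simp [or_imp, forall_and]
        rw [hsplit, ih]
        have hk : ((k : Int)).toNat = k := by omega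
        rw [hk, Int.shiftRight_natCast_right]
        show pvLz y k < j ∧ pvBit y k = 1 ↔ pvLz y (k+1) < j
        rcases pvBit_cases y k with h | h
        · have he : pvLz y (k+1) = (k : Int) := by simp [pvLz, h]
          rw [he]
          constructor
          · rintro ⟨_, h1⟩; omega
          · intro hlt; exact absurd hlt (by omega)
        · have he : pvLz y (k+1) = pvLz y k := by simp [pvLz, h]
          rw [he]
          constructor
          · rintro ⟨h1, _⟩; exact h1
          · intro h1; exact ⟨h1, h⟩

theorem setFoldEntry {α : Type} (g : Int → α) (l : List Int) (r0 : List α)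
    (h : ∀ j ∈ l, 0 ≤ j ∧ j < (r0.length : Int)) (m : Nat) :
    (l.foldl (fun r j => PySem.List.pySetD r j (g j)) r0)[m]? =
      if (m : Int) ∈ l then some (g m) else r0[m]? := by
  induction l generalizing r0 with
  | nil => simp
  | cons a l ih =>
      obtain ⟨ha0, hal⟩ := h a (by simp)
      simp only [List.foldl_cons]
      rw [PySem.List.pySetD_of_nonneg _ _ ha0]
      rw [ih _ (by intro j hj; have := h j (by simp [hj]); simpa [List.length_set] using this)]
      by_cases hm : (m : Int) ∈ l
      · rw [if_pos hm, if_pos (by simp [hm])]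
      · rw [if_neg hm]
        rw [List.getElem?_set]
        by_cases hma : (m : Int) = a
        · have ht : a.toNat = m := by omega
          rw [if_pos ht, if_pos (by omega), if_pos (by simp [List.mem_cons, hma]), hma]
        · have ht : a.toNat ≠ m := by omega
          rw [if_neg ht, if_neg (by simp [List.mem_cons, hm]; intro hc; exact hma hc)]

theorem pyGetD_pySetD_ne (J : List (List Int)) (a k : Int) (v : List Int)
    (ha : 0 ≤ a) (hk0 : 0 ≤ k) (hk1 : k < (J.length : Int)) (hne : k ≠ a) :
    PySem.List.pyGetD (PySem.List.pySetD J a v) k [] = PySem.List.pyGetD J k [] := by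
  rw [PySem.List.pySetD_of_nonneg _ _ ha,
      PySem.List.pyGetD_eq_getElem _ _ hk0 (by simpa using hk1),
      PySem.List.pyGetD_eq_getElem _ _ hk0 hk1]
  exact List.getElem_set_ne (by omega) _

theorem pyGetD_pySetD_self (J : List (List Int)) (k : Int) (v : List Int)
    (hk0 : 0 ≤ k) (hk1 : k < (J.length : Int)) :
    PySem.List.pyGetD (PySem.List.pySetD J k v) k [] = v := by
  rw [PySem.List.pySetD_of_nonneg _ _ hk0,
      PySem.List.pyGetD_eq_getElem _ _ hk0 (by simpa using hk1)]
  exact List.getElem_set_self (by simp; omega)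

theorem pySetD_pySetD_self (J : List (List Int)) (k : Int) (v w : List Int) (hk0 : 0 ≤ k) :
    PySem.List.pySetD (PySem.List.pySetD J k v) k w = PySem.List.pySetD J k w := by
  rw [PySem.List.pySetD_of_nonneg _ _ hk0, PySem.List.pySetD_of_nonneg _ _ hk0,
      PySem.List.pySetD_of_nonneg _ _ hk0]
  exact List.set_set ..

theorem innerCollapse (kk : Int) (g : Int → Int) (l : List Int) (J : List (List Int))
    (h0 : 0 ≤ kk) (h1 : kk < (J.length : Int)) :
    l.foldl (fun J j => PySem.List.pySetD J kk (PySem.List.pySetD (PySem.List.pyGetD J kk []) j (g j))) J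
    = PySem.List.pySetD J kk (l.foldl (fun r j => PySem.List.pySetD r j (g j)) (PySem.List.pyGetD J kk [])) := by
  induction l generalizing J with
  | nil =>
      simp only [List.foldl_nil]
      rw [PySem.List.pySetD_of_nonneg _ _ h0,
          PySem.List.pyGetD_eq_getElem _ _ h0 h1]
      exact (List.set_getElem_self (by omega)).symm
  | cons a l ih =>
      simp only [List.foldl_cons]
      rw [ih _ (by rwa [PySem.List.length_pySetD]),
          pyGetD_pySetD_self _ _ _ h0 h1,
          pySetD_pySetD_self _ _ _ _ h0]

theorem mainA (g : Int → Int → Int) (zrow : List Int) (l : List Int) (J : List (List Int))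
    (hp : l.Pairwise (· < ·))
    (h : ∀ k ∈ l, 0 ≤ k ∧ k < (J.length : Int) ∧ PySem.List.pyGetD J k [] = zrow) :
    l.foldl (fun J k =>
      (PySem.List.pyRange 0 k 1).foldl (fun J j =>
        PySem.List.pySetD J k (PySem.List.pySetD (PySem.List.pyGetD J k []) j (g k j))) J) J
    = l.foldl (fun J k =>
        PySem.List.pySetD J k
          ((PySem.List.pyRange 0 k 1).foldl (fun r j => PySem.List.pySetD r j (g k j)) zrow)) J := by
  induction hp generalizing J with
  | nil => rfl
  | @cons a l ha hl ih =>
      obtain ⟨ha0, hal, haz⟩ := h a (by simp)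
      simp only [List.foldl_cons]
      rw [innerCollapse a (g a) _ _ ha0 hal, haz]
      refine ih _ ?_
      intro k hk
      obtain ⟨hk0, hkl, hkz⟩ := h k (by simp [hk])
      have hak : a < k := ha k hk
      refine ⟨hk0, by rwa [PySem.List.length_pySetD], ?_⟩
      rw [pyGetD_pySetD_ne _ _ _ _ ha0 hk0 hkl (by omega)]
      exact hkz

def pvRowB (y n : Int) (k : Nat) : List Int :=
  (PySem.List.pyRange (pvLz y k + 1) (k : Int) 1).foldl
    (fun r j => PySem.List.pySetD r j 1) (List.replicate n.toNat (0 : Int))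

theorem bFold (y n : Int) (m : Nat) :
    ((PySem.List.pyRange 0 (m : Int) 1).foldl (fun (st : List (List Int) × Int) k =>
      let last0 := if 0 < k ∧ PySem.Int.band (y >>> (k - 1).toNat) 1 = 0 then k - 1 else st.2
      let row := (PySem.List.pyRange (last0 + 1) k 1).foldl
        (fun r j => PySem.List.pySetD r j 1) (List.replicate n.toNat (0 : Int))
      (st.1 ++ [row], last0)) ([], -1))
    = ((List.range m).map (pvRowB y n), pvLz y (m - 1)) := by
  induction m with
  | zero => simp [pvLz]
  | succ m ih =>
      simp only [Int.shiftRight_natCast_right] at ih ⊢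
      rw [show ((m + 1 : Nat) : Int) = (m : Int) + 1 by push_cast; ring]
      rw [PySem.List.pyRange_one_succ_right (by omega), List.foldl_append, ih, List.foldl_cons,
          List.foldl_nil]
      have hlast : (if 0 < (m : Int) ∧ PySem.Int.band (y >>> ((m : Int) - 1).toNat) 1 = 0
          then (m : Int) - 1 else pvLz y (m - 1)) = pvLz y m := by
        cases m with
        | zero => simp [pvLz]
        | succ k =>
            have ht : (((k + 1 : Nat) : Int) - 1).toNat = k := by omega
            rw [ht, Nat.add_sub_cancel]
            show (if _ ∧ pvBit y k = 0 then _ else _) = _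
            rcases pvBit_cases y k with h | h
            · rw [if_pos ⟨by push_cast; omega, h⟩]
              simp only [pvLz, h, if_true]
              push_cast; ring
            · rw [if_neg (by intro hc; omega)]
              simp [pvLz, h]
      simp only [hlast, Nat.add_sub_cancel]
      rw [List.range_succ, List.map_append]
      rfl

theorem rowEq (y n : Int) (hn : 0 ≤ n) (m : Nat) (hm : (m : Int) < n) :
    (PySem.List.pyRange 0 (m : Int) 1).foldl (fun r j =>
      PySem.List.pySetD r j
        ((PySem.List.pyRange j (m : Int) 1).foldl
          (fun p i => PySem.Int.band p (PySem.Int.band (y >>> i.toNat) 1)) 1))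
      (List.replicate n.toNat (0 : Int))
    = pvRowB y n m := by
  have hN : ((List.replicate n.toNat (0 : Int)).length : Int) = n := by
    simp [List.length_replicate]; omega
  have hlz := pvLz_bounds y m
  apply List.ext_getElem?
  intro p
  rw [setFoldEntry _ _ _ (by intro j hj; rw [PySem.List.mem_pyRange_one] at hj; constructor <;> omega)]
  unfold pvRowB
  rw [setFoldEntry _ _ _ (by intro j hj; rw [PySem.List.mem_pyRange_one] at hj; constructor <;> omega)]
  by_cases hp : p < m
  · rw [if_pos (by rw [PySem.List.mem_pyRange_one]; constructor <;> omega)]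
    rw [foldl_band_one (fun i => PySem.Int.band (y >>> ((i.toNat : Nat) : Int)) 1)
      (fun x => by
        show PySem.Int.band (y >>> ((x.toNat : Nat) : Int)) 1 = 0 ∨
          PySem.Int.band (y >>> ((x.toNat : Nat) : Int)) 1 = 1
        rw [Int.shiftRight_natCast_right]
        exact pvBit_cases y x.toNat)]
    simp only [allOnes_iff y m (p : Int) (by omega : (0:Int) ≤ (p:Int))]
    by_cases hz : pvLz y m < (p : Int)
    · rw [if_pos hz, if_pos (by rw [PySem.List.mem_pyRange_one]; constructor <;> omega)]
    · rw [if_neg hz, if_neg (by rw [PySem.List.mem_pyRange_one]; omega)]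
      rw [List.getElem?_replicate, if_pos (by omega)]
  · rw [if_neg (by rw [PySem.List.mem_pyRange_one]; omega),
        if_neg (by rw [PySem.List.mem_pyRange_one]; omega)]

theorem main_eq (y n : Int) : carry_jacobian_at_zero y n = carry_jacobian_at_zero_alt y n := by
  by_cases hn : n ≤ 0
  · unfold carry_jacobian_at_zero carry_jacobian_at_zero_alt
    rw [PySem.List.pyRange_one_eq_nil (by omega), PySem.List.pyRange_one_eq_nil (by omega)]
    rfl
  · replace hn : 0 < n := by omega
    have hN : ((n.toNat : Nat) : Int) = n := by omega
    unfold carry_jacobian_at_zero carry_jacobian_at_zero_alt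
    rw [show PySem.List.pyRange 0 n 1 = PySem.List.pyRange 0 ((n.toNat : Nat) : Int) 1 by rw [hN]]
    rw [bFold]
    have hJ0len : (((PySem.List.pyRange 0 ((n.toNat : Nat) : Int) 1).map
        (fun _ => List.replicate n.toNat (0 : Int))).length : Int) = n := by
      simp [PySem.List.length_pyRange_one]; omega
    rw [mainA _ (List.replicate n.toNat (0 : Int)) _ _ (PySem.List.pairwise_lt_pyRange_one 1 n)
      (by
        intro k hk
        rw [PySem.List.mem_pyRange_one] at hk
        refine ⟨by omega, by omega, ?_⟩
        rw [PySem.List.pyGetD_eq_getElem _ _ (by omega) (by omega)]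
        rw [List.getElem_map])]
    apply List.ext_getElem?
    intro m
    rw [setFoldEntry _ _ _ (by
      intro k hk
      rw [PySem.List.mem_pyRange_one] at hk
      exact ⟨by omega, by omega⟩)]
    show _ = (List.map (pvRowB y n) (List.range n.toNat))[m]?
    simp only [List.getElem?_map]
    by_cases hm : m < n.toNat
    · rw [List.getElem?_range hm]
      by_cases hm1 : 1 ≤ m
      · rw [if_pos (by rw [PySem.List.mem_pyRange_one]; constructor <;> omega)]
        rw [rowEq y n (by omega) m (by omega)]
        rfl
      · have hm0 : m = 0 := by omega
        subst hm0
        rw [if_neg (by rw [PySem.List.mem_pyRange_one]; omega)]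
        rw [PySem.List.getElem?_pyRange_one, if_pos (by omega)]
        have hrow : pvRowB y n 0 = List.replicate n.toNat (0 : Int) := by
          unfold pvRowB
          rw [show pvLz y 0 + 1 = (0 : Int) by simp [pvLz], PySem.List.pyRange_one_eq_nil (by omega)]
          rfl
        simp [hrow]
    · rw [if_neg (by rw [PySem.List.mem_pyRange_one]; omega)]
      rw [List.getElem?_eq_none (l := PySem.List.pyRange 0 ((n.toNat : Nat) : Int) 1)
            (by rw [PySem.List.length_pyRange_one]; omega),
          List.getElem?_eq_none (l := List.range n.toNat) (by simpa using hm)]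
      rfl

-- ===== VERDICT (by name: the statement is the Claim_ definition above) =====
theorem carry_jacobian_at_zero_spec : Claim_equal_carry_jacobian_at_zero := by
  intro y n _
  unfold Spec_carry_jacobian_at_zero
  exact main_eq y n
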